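-- pv_equiv track=rewrite | github.com/moleculadesigner/python_course | python_tasks/cycles.py | backward_seq
-- ===== SOURCE A (Python) =====
-- def backward_seq(max_num,min_num):
--     """
--     Prints backward cequence from max_num to min_num.
--     """
--     if max_num <= min_num:
--         return "Exception: invalid range."
--
--     out_seq_str = "For:\t"
--     for i in range(max_num,min_num - 1,-1):
--         out_seq_str += str(i)
--         if i > min_num:
--             out_seq_str += ", "
--
--     out_seq_str += "\nWhile:\t"
--     j = max_num
--     while j >= min_num:
--         out_seq_str += str(j)
--         if j > min_num:
--             out_seq_str += ", "
--         j -= 1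
--     return out_seq_str
-- ===== SOURCE B (Python) =====
-- def backward_seq(max_num, min_num):
--     """
--     Prints backward cequence from max_num to min_num.
--     """
--     if max_num <= min_num:
--         return "Exception: invalid range."
--     seq = ", ".join(str(i) for i in range(max_num, min_num - 1, -1))
--     return "For:\t" + seq + "\nWhile:\t" + seq
-- ===== Notes on version B (the rewrite author's own statement) =====
-- stated objective: simpler
-- what changed: B computes the descending sequence once with a single join and reuses it for both sections, replacing A's two separate string-building passes (a for-loop and a manual while-loop).
import Mathlib
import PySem

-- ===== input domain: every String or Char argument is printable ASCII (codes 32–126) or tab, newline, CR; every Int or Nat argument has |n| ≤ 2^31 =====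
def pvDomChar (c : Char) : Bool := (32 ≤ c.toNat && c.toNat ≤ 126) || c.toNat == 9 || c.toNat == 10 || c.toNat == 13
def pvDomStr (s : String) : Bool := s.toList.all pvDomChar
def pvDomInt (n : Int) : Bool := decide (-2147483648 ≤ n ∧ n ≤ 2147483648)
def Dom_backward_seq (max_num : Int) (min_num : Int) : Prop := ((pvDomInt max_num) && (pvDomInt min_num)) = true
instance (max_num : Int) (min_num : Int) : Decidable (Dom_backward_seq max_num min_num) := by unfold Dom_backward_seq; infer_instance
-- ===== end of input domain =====

-- B changes only the decomposition (one join reused for both sections); same return value, no speed claim.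

-- ===== PORT A =====
-- the manual 'while j >= min_num' loop of A, step for step
def backwardWhileA (min_num : Int) (j : Int) (acc : String) : String :=
  if _h : min_num ≤ j then
    backwardWhileA min_num (j - 1)
      ((acc ++ PySem.Int.toStr j) ++ (if min_num < j then ", " else ""))
  else acc
termination_by (j + 1 - min_num).toNat
decreasing_by omega

def backward_seq (max_num : Int) (min_num : Int) : String :=
  if max_num ≤ min_num then "Exception: invalid range."
  else
    let s1 := (PySem.List.pyRange max_num (min_num - 1) (-1)).foldl
      (fun s i => (s ++ PySem.Int.toStr i) ++ (if min_num < i then ", " else "")) "For:\t"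
    backwardWhileA min_num max_num (s1 ++ "\nWhile:\t")

-- ===== PORT B =====
def backward_seq_alt (max_num : Int) (min_num : Int) : String :=
  if max_num ≤ min_num then "Exception: invalid range."
  else
    let seq := PySem.Str.join ", "
      ((PySem.List.pyRange max_num (min_num - 1) (-1)).map PySem.Int.toStr)
    "For:\t" ++ seq ++ "\nWhile:\t" ++ seq

-- ===== PRECONDITION & SPEC =====
def Spec_backward_seq (max_num : Int) (min_num : Int) (out : String) : Prop := out = backward_seq_alt max_num min_num
instance (max_num : Int) (min_num : Int) (out : String) : Decidable (Spec_backward_seq max_num min_num out) := by unfold Spec_backward_seq; infer_instance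

-- ===== CLAIM (what is proved, stated in full; the proofs are below) =====
def Claim_equal_backward_seq : Prop := ∀ (max_num : Int) (min_num : Int), Dom_backward_seq max_num min_num → Spec_backward_seq max_num min_num (backward_seq max_num min_num)

-- ===== LEMMAS AND PROOFS =====
-- abbreviation used only by the proofs
def descJoin (min_num j : Int) : String :=
  PySem.Str.join ", " ((PySem.List.pyRange j (min_num - 1) (-1)).map PySem.Int.toStr)

theorem descJoin_empty (min_num j : Int) (h : j < min_num) :
    descJoin min_num j = "" := by
  unfold descJoin
  rw [PySem.List.pyRange_neg_one_eq_nil (by omega)]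
  simp [PySem.Str.join]

theorem descJoin_last (min_num : Int) :
    descJoin min_num min_num = PySem.Int.toStr min_num := by
  unfold descJoin
  rw [PySem.List.pyRange_neg_one_cons (by omega),
      PySem.List.pyRange_neg_one_eq_nil (by omega)]
  simp [PySem.Str.join, PySem.Chars.join_singleton]
  rw [← PySem.Int.toList_toStr, String.ofList_toList]

theorem descJoin_step (min_num j : Int) (h : min_num < j) :
    descJoin min_num j = PySem.Int.toStr j ++ ", " ++ descJoin min_num (j - 1) := by
  unfold descJoin
  rw [PySem.List.pyRange_neg_one_cons (by omega),
      PySem.List.pyRange_neg_one_cons (by omega : min_num - 1 < j - 1)]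
  simp [PySem.Str.join, PySem.Chars.join_cons_cons]
  rw [show (',' :: ' ' :: PySem.Chars.join [',', ' ']
        (PySem.Int.toChars (j - 1) ::
          List.map (String.toList ∘ PySem.Int.toStr) (PySem.List.pyRange (j - 1 - 1) (min_num - 1) (-1))))
      = [',', ' '] ++ PySem.Chars.join [',', ' ']
        (PySem.Int.toChars (j - 1) ::
          List.map (String.toList ∘ PySem.Int.toStr) (PySem.List.pyRange (j - 1 - 1) (min_num - 1) (-1))) from rfl,
    String.ofList_append, ← PySem.Int.toList_toStr, String.ofList_toList, ← String.append_assoc]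

theorem forLoop_eq (min_num : Int) : ∀ (j : Int) (acc : String),
    (PySem.List.pyRange j (min_num - 1) (-1)).foldl
      (fun s i => (s ++ PySem.Int.toStr i) ++ (if min_num < i then ", " else "")) acc
    = acc ++ descJoin min_num j := by
  intro j
  induction hn : (j - min_num + 1).toNat generalizing j with
  | zero =>
    intro acc
    rw [PySem.List.pyRange_neg_one_eq_nil (by omega), descJoin_empty min_num j (by omega)]
    simp
  | succ n ih =>
    intro acc
    rw [PySem.List.pyRange_neg_one_cons (by omega : min_num - 1 < j)]
    simp only [List.foldl_cons]
    rw [ih (j - 1) (by omega)]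
    by_cases hlt : min_num < j
    · rw [descJoin_step min_num j hlt]
      simp [hlt, String.append_assoc]
    · have hj : j = min_num := by omega
      rw [hj, descJoin_empty min_num (min_num - 1) (by omega), descJoin_last]
      simp

theorem whileLoop_eq (min_num : Int) : ∀ (j : Int) (acc : String),
    backwardWhileA min_num j acc = acc ++ descJoin min_num j := by
  intro j
  induction hn : (j - min_num + 1).toNat generalizing j with
  | zero =>
    intro acc
    rw [backwardWhileA, descJoin_empty min_num j (by omega)]
    simp [show ¬ min_num ≤ j by omega]
  | succ n ih =>
    intro acc
    rw [backwardWhileA]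
    simp only [show min_num ≤ j by omega, dite_true]
    rw [ih (j - 1) (by omega)]
    by_cases hlt : min_num < j
    · rw [descJoin_step min_num j hlt]
      simp [hlt, String.append_assoc]
    · have hj : j = min_num := by omega
      rw [hj, descJoin_empty min_num (min_num - 1) (by omega), descJoin_last]
      simp

-- ===== VERDICT (by name: the statement is the Claim_ definition above) =====
theorem backward_seq_spec : Claim_equal_backward_seq := by
  intro max_num min_num _
  unfold Spec_backward_seq backward_seq backward_seq_alt
  by_cases h : max_num ≤ min_num
  · simp [h]
  · simp only [h, if_false]
    rw [forLoop_eq, whileLoop_eq]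
    simp [descJoin, String.append_assoc]
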